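-- pv_equiv track=rewrite | github.com/codi21/inteligencia_artifical | Genetico.py | cant_amenazas
-- ===== SOURCE A (Python) =====
-- import math
--
-- def cant_amenazas(vec):
--     point = 0
--     for i in range (len(vec)):
--         j = 0
--         while(j < len(vec)):
--             if i != j :
--                 if (math.fabs(i - j) == math.fabs(vec[i] - vec[j])):
--                     point += 1
--             j+=1
--     return point
-- ===== SOURCE B (Python) =====
-- def cant_amenazas(vec):
--     diag = {}
--     anti = {}
--     for i, v in enumerate(vec):
--         diag[i - v] = diag.get(i - v, 0) + 1
--         anti[i + v] = anti.get(i + v, 0) + 1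
--     total = 0
--     for k in diag:
--         total += diag[k] * (diag[k] - 1)
--     for k in anti:
--         total += anti[k] * (anti[k] - 1)
--     return total
-- ===== Notes on version B (the rewrite author's own statement) =====
-- stated objective: faster
-- what changed: Replaced A's quadratic all-pairs |i-j|==|v_i-v_j| scan by a single pass that counts queens per diagonal (keys i-v_i and i+v_i) in two dicts and sums c*(c-1) over each diagonal's count.
import Mathlib
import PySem

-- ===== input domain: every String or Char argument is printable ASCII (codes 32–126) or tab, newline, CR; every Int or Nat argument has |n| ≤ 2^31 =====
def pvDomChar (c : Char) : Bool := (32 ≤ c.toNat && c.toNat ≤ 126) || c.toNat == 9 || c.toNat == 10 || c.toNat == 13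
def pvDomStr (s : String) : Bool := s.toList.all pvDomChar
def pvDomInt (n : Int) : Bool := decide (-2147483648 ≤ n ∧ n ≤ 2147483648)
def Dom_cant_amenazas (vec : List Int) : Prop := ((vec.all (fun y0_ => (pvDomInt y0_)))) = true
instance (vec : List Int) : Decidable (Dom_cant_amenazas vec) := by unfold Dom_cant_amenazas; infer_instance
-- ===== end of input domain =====

-- B replaces A's quadratic all-pairs scan by one pass that counts queens per diagonal
-- (keys i-vec[i] and i+vec[i]) in two dicts and sums c*(c-1) per diagonal (objective: faster).

-- ===== PORT A =====
-- the inner `while j < len(vec)` loop of A, step for step (j is the loop counter);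
-- math.fabs(x) == math.fabs(y) on ints within the stated domain is exactly natAbs equality
-- (floats are exact below 2^53)
def cantWhileA (vec : List Int) (i : Int) (point : Int) (j : Nat) : Int :=
  if _h : j < vec.length then
    cantWhileA vec i
      (if i ≠ (j : Int) then
        (if (i - (j : Int)).natAbs
            = (PySem.List.pyGetD vec i 0 - PySem.List.pyGetD vec (j : Int) 0).natAbs
         then point + 1 else point)
       else point)
      (j + 1)
  else point
termination_by vec.length - j

def cant_amenazas (vec : List Int) : Int :=
  (PySem.List.pyRange 0 (vec.length : Int)).foldl
    (fun point i => cantWhileA vec i point 0) 0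

-- ===== PORT B =====
def cant_amenazas_alt (vec : List Int) : Int :=
  let dicts := (PySem.List.enumerate vec).foldl
    (fun (p : PySem.Dict Int Int × PySem.Dict Int Int) iv =>
      (p.1.modify (iv.1 - iv.2) 0 (· + 1), p.2.modify (iv.1 + iv.2) 0 (· + 1)))
    (PySem.Dict.empty, PySem.Dict.empty)
  let diag := dicts.1
  let anti := dicts.2
  let total := diag.keys.foldl (fun t k => t + diag.getD k 0 * (diag.getD k 0 - 1)) 0
  anti.keys.foldl (fun t k => t + anti.getD k 0 * (anti.getD k 0 - 1)) total

-- ===== PRECONDITION & SPEC =====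
def Spec_cant_amenazas (vec : List Int) (out : Int) : Prop := out = cant_amenazas_alt vec
instance (vec : List Int) (out : Int) : Decidable (Spec_cant_amenazas vec out) := by unfold Spec_cant_amenazas; infer_instance

-- ===== CLAIM (what is proved, stated in full; the proofs are below) =====
def Claim_equal_cant_amenazas : Prop := ∀ (vec : List Int), Dom_cant_amenazas vec → Spec_cant_amenazas vec (cant_amenazas vec)

-- ===== LEMMAS AND PROOFS =====

-- the diagonal keys i - vec[i] and i + vec[i], as B's first pass produces them
def dKeys (vec : List Int) : List Int := (PySem.List.enumerate vec).map (fun iv => iv.1 - iv.2)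
def sKeys (vec : List Int) : List Int := (PySem.List.enumerate vec).map (fun iv => iv.1 + iv.2)

-- per-cell contribution of A's inner loop body
def gA (vec : List Int) (i : Int) (j : Nat) : Int :=
  if i ≠ (j : Int) then
    (if (i - (j : Int)).natAbs
        = (PySem.List.pyGetD vec i 0 - PySem.List.pyGetD vec (j : Int) 0).natAbs
     then 1 else 0)
  else 0

-- number of ordered pairs of equal keys at distinct indices
def pairSum (ks : List Int) : Int :=
  ∑ i ∈ Finset.range ks.length, ∑ j ∈ Finset.range ks.length,
    (if ks.getD i 0 = ks.getD j 0 ∧ i ≠ j then 1 else 0)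

-- B's per-dict total: sum of c·(c−1) over the distinct keys
def groupSum (ks : List Int) : Int :=
  ∑ x ∈ ks.toFinset, (ks.count x : Int) * ((ks.count x : Int) - 1)

lemma enumerate_eq (xs : List Int) : ∀ s : Int,
    PySem.List.enumerate xs s
      = (List.range xs.length).map (fun (i : Nat) => (s + (i : Int), xs.getD i 0)) := by
  induction xs with
  | nil => intro s; simp [PySem.List.enumerate]
  | cons x t ih =>
    intro s
    show (s, x) :: PySem.List.enumerate t (s + 1) = _
    rw [ih (s + 1)]
    simp only [List.length_cons, List.range_succ_eq_map, List.map_cons, List.map_map]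
    congr 1
    · simp
    · apply List.map_congr_left; intro i hi
      simp [Function.comp]
      ring

lemma map_getD_range (ks : List Int) :
    (List.range ks.length).map (fun j => ks.getD j 0) = ks := by
  apply List.ext_getElem
  · simp
  · intro i h1 h2; simp [List.getD_eq_getElem?_getD, List.getElem?_eq_getElem h2]

lemma dKeys_eq (vec : List Int) :
    dKeys vec = (List.range vec.length).map (fun (i : Nat) => (i : Int) - vec.getD i 0) := by
  unfold dKeys; rw [enumerate_eq vec 0, List.map_map]
  apply List.map_congr_left; intro i hi; simp

lemma sKeys_eq (vec : List Int) :
    sKeys vec = (List.range vec.length).map (fun (i : Nat) => (i : Int) + vec.getD i 0) := by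
  unfold sKeys; rw [enumerate_eq vec 0, List.map_map]
  apply List.map_congr_left; intro i hi; simp

lemma length_dKeys (vec : List Int) : (dKeys vec).length = vec.length := by
  rw [dKeys_eq]; simp

lemma length_sKeys (vec : List Int) : (sKeys vec).length = vec.length := by
  rw [sKeys_eq]; simp

lemma getD_dKeys (vec : List Int) {i : Nat} (h : i < vec.length) :
    (dKeys vec).getD i 0 = (i : Int) - vec.getD i 0 := by
  rw [dKeys_eq]
  simp [List.getD_eq_getElem?_getD, h]

lemma getD_sKeys (vec : List Int) {i : Nat} (h : i < vec.length) :
    (sKeys vec).getD i 0 = (i : Int) + vec.getD i 0 := by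
  rw [sKeys_eq]
  simp [List.getD_eq_getElem?_getD, h]

-- A's inner while-loop is the sum of gA over the remaining indices
lemma cantWhileA_eq (vec : List Int) (i : Int) :
    ∀ (fuel j : Nat), vec.length - j = fuel → ∀ point,
      cantWhileA vec i point j = point + ((List.range' j fuel).map (gA vec i)).sum := by
  intro fuel
  induction fuel with
  | zero =>
    intro j hj point
    unfold cantWhileA
    rw [dif_neg (by omega)]
    simp
  | succ f ih =>
    intro j hj point
    unfold cantWhileA
    rw [dif_pos (by omega), ih (j + 1) (by omega)]
    rw [List.range'_succ, List.map_cons, List.sum_cons]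
    unfold gA
    split_ifs <;> ring

lemma cantWhileA_zero (vec : List Int) (i : Int) (point : Int) :
    cantWhileA vec i point 0 = point + ((List.range vec.length).map (gA vec i)).sum := by
  rw [cantWhileA_eq vec i vec.length 0 (by omega) point, List.range_eq_range']

-- A as a double sum
lemma cantA_eq_double_sum (vec : List Int) :
    cant_amenazas vec
      = ∑ k ∈ Finset.range vec.length, ∑ j ∈ Finset.range vec.length, gA vec (k : Int) j := by
  unfold cant_amenazas
  rw [PySem.List.pyRange_zero_natCast, List.foldl_map]
  rw [List.foldl_ext _ (fun (point : Int) (k : Nat) =>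
        point + ((List.range vec.length).map (gA vec (k : Int))).sum)
      0 (fun a x _ => cantWhileA_zero vec (x : Int) a)]
  rw [PySem.List.foldl_add]
  simp only [zero_add]
  rfl

-- pointwise split of A's cell into the two diagonal-key coincidences
lemma gA_split (vec : List Int) {i j : Nat} (hi : i < vec.length) (hj : j < vec.length) :
    gA vec (i : Int) j
      = (if (dKeys vec).getD i 0 = (dKeys vec).getD j 0 ∧ i ≠ j then 1 else 0)
        + (if (sKeys vec).getD i 0 = (sKeys vec).getD j 0 ∧ i ≠ j then 1 else 0) := by
  unfold gA
  rw [getD_dKeys vec hi, getD_dKeys vec hj, getD_sKeys vec hi, getD_sKeys vec hj]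
  rw [PySem.List.pyGetD_eq_getElem vec 0 (by omega) (by omega),
      PySem.List.pyGetD_eq_getElem vec 0 (by omega) (by omega)]
  simp only [Int.toNat_natCast]
  have e1 : vec.getD i 0 = vec[i] := by
    simp [List.getD_eq_getElem?_getD, List.getElem?_eq_getElem hi]
  have e2 : vec.getD j 0 = vec[j] := by
    simp [List.getD_eq_getElem?_getD, List.getElem?_eq_getElem hj]
  rw [e1, e2]
  split_ifs <;> omega

lemma cantA_eq_pairSums (vec : List Int) :
    cant_amenazas vec = pairSum (dKeys vec) + pairSum (sKeys vec) := by
  rw [cantA_eq_double_sum]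
  unfold pairSum
  rw [length_dKeys, length_sKeys]
  have h1 : ∀ i ∈ Finset.range vec.length, ∀ j ∈ Finset.range vec.length,
      gA vec (i : Int) j
        = (if (dKeys vec).getD i 0 = (dKeys vec).getD j 0 ∧ i ≠ j then 1 else 0)
          + (if (sKeys vec).getD i 0 = (sKeys vec).getD j 0 ∧ i ≠ j then 1 else 0) := by
    intro i hi j hj
    exact gA_split vec (Finset.mem_range.mp hi) (Finset.mem_range.mp hj)
  calc ∑ k ∈ Finset.range vec.length, ∑ j ∈ Finset.range vec.length, gA vec (k : Int) j
      = ∑ k ∈ Finset.range vec.length, ∑ j ∈ Finset.range vec.length,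
          ((if (dKeys vec).getD k 0 = (dKeys vec).getD j 0 ∧ k ≠ j then 1 else 0)
            + (if (sKeys vec).getD k 0 = (sKeys vec).getD j 0 ∧ k ≠ j then 1 else 0)) := by
        exact Finset.sum_congr rfl fun i hi => Finset.sum_congr rfl fun j hj => h1 i hi j hj
    _ = _ := by simp [Finset.sum_add_distrib]

lemma sum_ite_count (x : Int) (ks : List Int) :
    (ks.map (fun y => if x = y then (1 : Int) else 0)).sum = (ks.count x : Int) := by
  induction ks with
  | nil => simp
  | cons h t ih =>
    simp only [List.map_cons, List.sum_cons, List.count_cons, ih]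
    by_cases hx : x = h
    · simp [hx]; ring
    · have : (h == x) = false := by simp [Ne.symm hx]
      simp [hx, this]

lemma sum_range_getD (ks : List Int) (f : Int → Int) :
    ∑ j ∈ Finset.range ks.length, f (ks.getD j 0) = (ks.map f).sum := by
  have : ∑ j ∈ Finset.range ks.length, f (ks.getD j 0)
      = ((List.range ks.length).map (fun j => f (ks.getD j 0))).sum := rfl
  rw [this,
    show (List.map (fun j => f (ks.getD j 0)) (List.range ks.length))
        = List.map f (List.map (fun j => ks.getD j 0) (List.range ks.length)) from by
      rw [List.map_map]; rfl,
    map_getD_range]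

lemma pairSum_eq_groupSum (ks : List Int) : pairSum ks = groupSum ks := by
  unfold pairSum
  have inner : ∀ i ∈ Finset.range ks.length,
      ∑ j ∈ Finset.range ks.length, (if ks.getD i 0 = ks.getD j 0 ∧ i ≠ j then (1:Int) else 0)
        = (ks.count (ks.getD i 0) : Int) - 1 := by
    intro i hi
    have step : ∀ j ∈ Finset.range ks.length,
        (if ks.getD i 0 = ks.getD j 0 ∧ i ≠ j then (1:Int) else 0)
          = (if ks.getD i 0 = ks.getD j 0 then (1:Int) else 0) - (if i = j then (1:Int) else 0) := by
      intro j _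
      by_cases hij : i = j
      · subst hij; simp
      · simp [hij]
    rw [Finset.sum_congr rfl step, Finset.sum_sub_distrib]
    rw [Finset.sum_ite_eq (Finset.range ks.length) i (fun _ => (1:Int))]
    rw [if_pos hi]
    rw [sum_range_getD ks (fun y => if ks.getD i 0 = y then (1:Int) else 0)]
    rw [sum_ite_count (ks.getD i 0) ks]
  rw [Finset.sum_congr rfl inner, Finset.sum_sub_distrib]
  rw [sum_range_getD ks (fun y => (ks.count y : Int))]
  rw [Finset.sum_list_map_count ks (fun y => (ks.count y : Int))]
  have hlen : (∑ _j ∈ Finset.range ks.length, (1:Int)) = (ks.length : Int) := by simp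
  rw [hlen]
  have hcount : (ks.length : Int) = ∑ x ∈ ks.toFinset, (ks.count x : Int) := by
    rw [← List.sum_toFinset_count_eq_length ks]
    push_cast
    rfl
  rw [hcount]
  unfold groupSum
  rw [← Finset.sum_sub_distrib]
  refine Finset.sum_congr rfl fun x _ => ?_
  rw [nsmul_eq_mul]
  ring

lemma setSum_eq_groupSum (ks : List Int) :
    ((PySem.Set.ofList ks).map (fun k => (ks.count k : Int) * ((ks.count k : Int) - 1))).sum
      = groupSum ks := by
  rw [← List.sum_toFinset _ (PySem.Set.nodup_ofList ks)]
  unfold groupSum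
  refine Finset.sum_congr ?_ fun x _ => rfl
  ext x
  simp [List.mem_toFinset, PySem.Set.mem_ofList]

lemma counter_build (vec : List Int) :
    List.foldl (fun (d : PySem.Dict Int Int) (iv : Int × Int) => d.modify (iv.1 - iv.2) 0 (· + 1))
        PySem.Dict.empty (PySem.List.enumerate vec)
      = PySem.Dict.counter (dKeys vec) := by
  unfold dKeys PySem.Dict.counter
  rw [List.foldl_map]

lemma counter_build' (vec : List Int) :
    List.foldl (fun (d : PySem.Dict Int Int) (iv : Int × Int) => d.modify (iv.1 + iv.2) 0 (· + 1))
        PySem.Dict.empty (PySem.List.enumerate vec)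
      = PySem.Dict.counter (sKeys vec) := by
  unfold sKeys PySem.Dict.counter
  rw [List.foldl_map]

lemma altB_eq (vec : List Int) :
    cant_amenazas_alt vec = groupSum (dKeys vec) + groupSum (sKeys vec) := by
  unfold cant_amenazas_alt
  rw [PySem.List.foldl_prod_mk
      (fun (d : PySem.Dict Int Int) (iv : Int × Int) => d.modify (iv.1 - iv.2) 0 (· + 1))
      (fun (d : PySem.Dict Int Int) (iv : Int × Int) => d.modify (iv.1 + iv.2) 0 (· + 1))]
  rw [counter_build vec, counter_build' vec]
  dsimp only
  rw [PySem.Dict.keys_counter, PySem.Dict.keys_counter]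
  rw [PySem.List.foldl_add, PySem.List.foldl_add]
  simp only [PySem.Dict.getD_counter, zero_add]
  rw [setSum_eq_groupSum, setSum_eq_groupSum]

-- ===== VERDICT (by name: the statement is the Claim_ definition above) =====
theorem cant_amenazas_spec : Claim_equal_cant_amenazas := by
  intro vec _
  unfold Spec_cant_amenazas
  rw [cantA_eq_pairSums, altB_eq, pairSum_eq_groupSum, pairSum_eq_groupSum]
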